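-- pv_equiv track=rewrite | github.com/gaomengnan/aoc | geeksforgeeks_Remove and Reverse/main.py | removeReverse
-- ===== SOURCE A (Python) =====
-- from collections import Counter, deque
--
-- def removeReverse(S):
--     freqs = Counter(S)
--     dq = list(S)
--
--     left_to_right = True
--     result = []
--     i = 0
--     j = len(dq) - 1
--     while i < j:
--         if left_to_right:
--             ch = dq[i]
--             if freqs[ch] > 1:
--                 freqs[ch] -= 1
--                 left_to_right = False
--                 del dq[i]
--                 # i -= 1
--                 j -= 1
--             else:
--                 i += 1
--         # result.append(dq.popleft())
--         else:
--             ch = dq[j]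
--             if freqs[ch] > 1:
--                 freqs[ch] -= 1
--                 left_to_right = True
--                 del dq[j]
--                 j -= 1
--                 # i -= 1
--             else:
--                 j -= 1
--             # result.append(dq.pop())
--
--     if left_to_right is False:
--         dq.reverse()
--
--     return "".join(dq)
-- ===== SOURCE B (Python) =====
-- from collections import Counter, deque
--
-- def removeReverse(S):
--     # O(n): deque window with O(1) boundary removals + kept-char accumulators.
--     freqs = Counter(S)
--     window = deque(S)
--     left = []
--     right = []
--     ltr = True
--     while len(window) >= 2:
--         if ltr:
--             ch = window[0]
--             if freqs[ch] > 1: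
--                 freqs[ch] -= 1
--                 window.popleft()
--                 ltr = False
--             else:
--                 left.append(window.popleft())
--         else:
--             ch = window[-1]
--             if freqs[ch] > 1:
--                 freqs[ch] -= 1
--                 window.pop()
--                 ltr = True
--             else:
--                 right.append(window.pop())
--     core = left + list(window) + right[::-1]
--     if not ltr:
--         core.reverse()
--     return "".join(core)
-- ===== Notes on version B (the rewrite author's own statement) =====
-- stated objective: faster
-- what changed: Replaces A's in-place list with quadratic `del dq[i]` interior deletions and moving i/j indices by a deque window with O(1) popleft/pop boundary removals plus separate kept-left/kept-right accumulator lists that are assembled once at the end.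
import Mathlib
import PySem

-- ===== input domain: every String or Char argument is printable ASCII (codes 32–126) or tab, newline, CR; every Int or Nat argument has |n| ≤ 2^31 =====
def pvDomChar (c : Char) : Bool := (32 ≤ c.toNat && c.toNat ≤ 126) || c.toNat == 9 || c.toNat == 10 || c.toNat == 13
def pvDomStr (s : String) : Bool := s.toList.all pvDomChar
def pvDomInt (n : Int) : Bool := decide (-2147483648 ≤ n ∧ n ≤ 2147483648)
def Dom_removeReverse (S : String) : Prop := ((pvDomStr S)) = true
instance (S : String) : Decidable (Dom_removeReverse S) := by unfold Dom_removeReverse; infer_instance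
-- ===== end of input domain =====

-- B replaces A's quadratic `del dq[i]` two-pointer scan by a deque window with O(1)
-- boundary removals plus kept-char accumulators (same return value; objective: faster).

-- ===== PORT A =====
-- while-loop of A: state (freqs, dq, left_to_right, i, j); returns final (dq, left_to_right)
def loopA (freqs : PySem.Dict Char Int) (dq : List Char) (ltr : Bool) (i j : Int) :
    List Char × Bool :=
  if _h : i < j then
    if ltr then
      match PySem.List.pyGet? dq i with
      | none => (dq, ltr)  -- unreachable totalizing guard (IndexError)
      | some ch =>
        if freqs.getD ch 0 > 1 then
          match PySem.List.pop? dq i with  -- del dq[i]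
          | none => (dq, ltr)  -- unreachable totalizing guard
          | some (_, dq') =>
            loopA (freqs.insert ch (freqs.getD ch 0 - 1)) dq' false i (j - 1)
        else
          loopA freqs dq ltr (i + 1) j
    else
      match PySem.List.pyGet? dq j with
      | none => (dq, ltr)  -- unreachable totalizing guard
      | some ch =>
        if freqs.getD ch 0 > 1 then
          match PySem.List.pop? dq j with  -- del dq[j]
          | none => (dq, ltr)  -- unreachable totalizing guard
          | some (_, dq') =>
            loopA (freqs.insert ch (freqs.getD ch 0 - 1)) dq' true i (j - 1)
        else
          loopA freqs dq ltr i (j - 1)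
  else (dq, ltr)
termination_by (j - i).toNat
decreasing_by all_goals omega

def removeReverse (S : String) : String :=
  let freqs := PySem.Dict.counter S.toList
  let dq := S.toList
  let res := loopA freqs dq true 0 ((dq.length : Int) - 1)
  String.mk (if res.2 = false then res.1.reverse else res.1)

-- ===== PORT B =====
-- while-loop of B: state (freqs, window, ltr, left, right); returns (window, left, right, ltr)
def loopB (freqs : PySem.Dict Char Int) (window : List Char) (ltr : Bool)
    (left right : List Char) : List Char × List Char × List Char × Bool :=
  if _h : 2 ≤ window.length then
    if ltr then
      match window with
      | [] => (window, left, right, ltr)  -- unreachable (window nonempty)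
      | ch :: rest =>
        if freqs.getD ch 0 > 1 then
          loopB (freqs.insert ch (freqs.getD ch 0 - 1)) rest false left right
        else
          loopB freqs rest ltr (left ++ [ch]) right
    else
      match window.getLast? with
      | none => (window, left, right, ltr)  -- unreachable (window nonempty)
      | some ch =>
        if freqs.getD ch 0 > 1 then
          loopB (freqs.insert ch (freqs.getD ch 0 - 1)) window.dropLast true left right
        else
          loopB freqs window.dropLast ltr left (right ++ [ch])
  else (window, left, right, ltr)
termination_by window.length
decreasing_by all_goals (simp_all [List.length_dropLast]; try omega)

def removeReverse_alt (S : String) : String :=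
  let freqs := PySem.Dict.counter S.toList
  let res := loopB freqs S.toList true [] []
  let core := res.2.1 ++ res.1 ++ res.2.2.1.reverse
  String.mk (if res.2.2.2 then core else core.reverse)

-- ===== PRECONDITION & SPEC =====
def Spec_removeReverse (S : String) (out : String) : Prop := out = removeReverse_alt S
instance (S : String) (out : String) : Decidable (Spec_removeReverse S out) := by unfold Spec_removeReverse; infer_instance

-- ===== CLAIM (what is proved, stated in full; the proofs are below) =====
def Claim_equal_removeReverse : Prop := ∀ (S : String), Dom_removeReverse S → Spec_removeReverse S (removeReverse S)

-- ===== LEMMAS AND PROOFS =====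

-- A's dq always has the shape left-kept ++ window ++ reverse right-kept, with i, j at the
-- window boundaries; under that invariant A's loop is B's loop.
-- `del` at an interior position: general list facts the proof needs
lemma eraseIdx_mid {α : Type} : ∀ (L tail : List α) (ch : α),
    (L ++ ch :: tail).eraseIdx L.length = L ++ tail
  | [], _, _ => rfl
  | a :: t, tail, ch => by simpa using eraseIdx_mid t tail ch

lemma pop_mid {α : Type} (L tail : List α) (ch : α) :
    PySem.List.pop? (L ++ ch :: tail) (L.length : Int) = some (ch, L ++ tail) := by
  rw [PySem.List.pop?_natCast (L ++ ch :: tail) L.length (by simp)]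
  simp [eraseIdx_mid]

lemma simLoop : ∀ (n : Nat) (w : List Char), w.length = n →
    ∀ (L r : List Char) (freqs : PySem.Dict Char Int) (ltr : Bool),
    loopA freqs (L ++ w ++ r.reverse) ltr (L.length : Int) ((L.length : Int) + w.length - 1) =
      ((loopB freqs w ltr L r).2.1 ++ (loopB freqs w ltr L r).1 ++
        (loopB freqs w ltr L r).2.2.1.reverse, (loopB freqs w ltr L r).2.2.2) := by
  intro n
  induction n using Nat.strong_induction_on with
  | _ n IH =>
  intro w hw L r freqs ltr
  rw [loopA, loopB]
  by_cases hlen : 2 ≤ w.length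
  · have hguard : (L.length : Int) < (L.length : Int) + w.length - 1 := by omega
    rw [dif_pos hguard, dif_pos hlen]
    cases ltr with
    | true =>
      obtain ⟨ch, rest, rfl⟩ : ∃ ch rest, w = ch :: rest := by
        cases w with
        | nil => simp at hlen
        | cons a t => exact ⟨a, t, rfl⟩
      rw [List.append_assoc, List.cons_append, PySem.List.pyGet?_append_length L (rest ++ r.reverse) ch]
      dsimp only
      by_cases hdup : freqs.getD ch 0 > 1
      · rw [if_pos hdup, if_pos hdup, pop_mid]
        dsimp only
        have hidx : (L.length : Int) + ((ch :: rest).length : Int) - 1 - 1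
            = (L.length : Int) + (rest.length : Int) - 1 := by simp; try omega
        rw [hidx, ← List.append_assoc]
        exact IH rest.length (by simp [← hw]) rest rfl L r _ false
      · rw [if_neg hdup, if_neg hdup]
        have h1 : ((L ++ [ch]).length : Int) = (L.length : Int) + 1 := by simp
        have h2 : (L.length : Int) + ((ch :: rest).length : Int) - 1
            = ((L ++ [ch]).length : Int) + (rest.length : Int) - 1 := by simp; try omega
        have h3 : L ++ ch :: (rest ++ r.reverse) = (L ++ [ch]) ++ rest ++ r.reverse := by simp
        rw [← h1, h2, h3]
        exact IH rest.length (by simp [← hw]) rest rfl (L ++ [ch]) r freqs true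
    | false =>
      obtain ⟨init, ch, rfl⟩ : ∃ init ch, w = init ++ [ch] := by
        have hne : w ≠ [] := by rintro rfl; simp at hlen
        exact ⟨w.dropLast, w.getLast hne, (List.dropLast_concat_getLast hne).symm⟩
      rw [List.getLast?_concat, List.dropLast_concat]
      dsimp only
      have hidx : (L.length : Int) + ((init ++ [ch]).length : Int) - 1
          = (((L ++ init).length : Nat) : Int) := by simp; try omega
      have hsplit : L ++ (init ++ [ch]) ++ r.reverse = (L ++ init) ++ ch :: r.reverse := by simp
      rw [hidx, hsplit, PySem.List.pyGet?_append_length]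
      dsimp only
      by_cases hdup : freqs.getD ch 0 > 1
      · rw [if_pos hdup, if_pos hdup, pop_mid]
        dsimp only
        have hidx2 : (((L ++ init).length : Nat) : Int) - 1
            = (L.length : Int) + (init.length : Int) - 1 := by simp; try omega
        rw [hidx2, List.append_assoc]
        exact IH init.length (by simp at hw; omega) init rfl L r _ true
      · rw [if_neg hdup, if_neg hdup]
        have h4 : (L ++ init) ++ ch :: r.reverse = L ++ init ++ (r ++ [ch]).reverse := by simp
        have hidx3 : (((L ++ init).length : Nat) : Int) - 1
            = (L.length : Int) + (init.length : Int) - 1 := by simp; try omega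
        rw [h4, hidx3]
        have := IH init.length (by simp at hw; omega) init rfl L (r ++ [ch]) freqs false
        simpa using this
  · have hng : ¬ ((L.length : Int) < (L.length : Int) + w.length - 1) := by omega
    rw [dif_neg hng, dif_neg hlen]

lemma simLoop_main (s : List Char) (freqs : PySem.Dict Char Int) :
    loopA freqs s true 0 ((s.length : Int) - 1) =
      ((loopB freqs s true [] []).2.1 ++ (loopB freqs s true [] []).1 ++
        (loopB freqs s true [] []).2.2.1.reverse, (loopB freqs s true [] []).2.2.2) := by
  have h := simLoop s.length s rfl [] [] freqs true
  simpa using h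

-- ===== VERDICT (by name: the statement is the Claim_ definition above) =====
theorem removeReverse_spec : Claim_equal_removeReverse := by
  intro S _
  unfold Spec_removeReverse removeReverse removeReverse_alt
  dsimp only
  rw [simLoop_main]
  cases h : (loopB (PySem.Dict.counter S.toList) S.toList true [] []).2.2.2 <;> simp
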